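-- pv_equiv track=rewrite | github.com/Maplx/flexpass_mapl | plot.py | sum_max_reconfig
-- ===== SOURCE A (Python) =====
-- def sum_max_reconfig(reconfig_list):
--     max_value = 0
--     current_max = 0
--
--     for r in reconfig_list:
--         if r > 0:
--             current_max = max(current_max, r)  # Track the maximum value in a contiguous sequence
--         else:
--             max_value += current_max  # Add the current max and reset
--             current_max = 0
--
--     max_value += current_max  # Add any remaining max value in the list
--     return max_value
-- ===== SOURCE B (Python) =====
-- def sum_max_reconfig(reconfig_list):
--     # Build the maximal contiguous runs of positive values, then sum each run's max.
--     runs = []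
--     cur = []
--     for r in reconfig_list:
--         if r > 0:
--             cur.append(r)
--         else:
--             if cur:
--                 runs.append(cur)
--             cur = []
--     if cur:
--         runs.append(cur)
--     return sum(max(run) for run in runs)
-- ===== Notes on version B (the rewrite author's own statement) =====
-- stated objective: alternative
-- what changed: Replaces the running-accumulator single pass (max_value/current_max state) with an explicit segment decomposition: build the maximal contiguous runs of positive values, then sum the maximum of each run.
import Mathlib
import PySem

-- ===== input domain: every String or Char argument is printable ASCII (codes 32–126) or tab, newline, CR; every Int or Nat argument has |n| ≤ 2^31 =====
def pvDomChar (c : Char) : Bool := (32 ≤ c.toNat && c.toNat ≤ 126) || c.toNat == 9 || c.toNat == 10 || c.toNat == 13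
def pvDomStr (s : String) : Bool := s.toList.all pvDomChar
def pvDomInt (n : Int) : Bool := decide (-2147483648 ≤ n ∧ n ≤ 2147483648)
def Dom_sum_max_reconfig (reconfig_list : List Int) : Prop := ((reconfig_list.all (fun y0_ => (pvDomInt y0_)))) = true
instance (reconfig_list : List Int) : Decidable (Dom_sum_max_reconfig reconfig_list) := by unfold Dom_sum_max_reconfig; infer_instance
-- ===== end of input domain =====

-- B builds the maximal positive runs explicitly and sums each run's max (alternative decomposition; same cost as A).
-- ===== PORT A =====
def sum_max_reconfig (reconfig_list : List Int) : Int :=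
  let st := reconfig_list.foldl
    (fun (st : Int × Int) r =>
      if r > 0 then (st.1, max st.2 r) else (st.1 + st.2, 0))
    (0, 0)
  st.1 + st.2

-- ===== PORT B =====
-- Python max(run) on a nonempty list (B only ever applies it to nonempty runs)
def pyMaxRun (run : List Int) : Int :=
  match run with
  | [] => 0
  | x :: xs => xs.foldl max x

def sum_max_reconfig_alt (reconfig_list : List Int) : Int :=
  let st := reconfig_list.foldl
    (fun (st : List (List Int) × List Int) r =>
      if r > 0 then (st.1, st.2 ++ [r])
      else (if st.2 ≠ [] then st.1 ++ [st.2] else st.1, []))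
    ([], [])
  let runs := if st.2 ≠ [] then st.1 ++ [st.2] else st.1
  (runs.map pyMaxRun).sum

-- ===== PRECONDITION & SPEC =====
def Spec_sum_max_reconfig (reconfig_list : List Int) (out : Int) : Prop := out = sum_max_reconfig_alt reconfig_list
instance (reconfig_list : List Int) (out : Int) : Decidable (Spec_sum_max_reconfig reconfig_list out) := by unfold Spec_sum_max_reconfig; infer_instance

-- ===== CLAIM (what is proved, stated in full; the proofs are below) =====
def Claim_equal_sum_max_reconfig : Prop := ∀ (reconfig_list : List Int), Dom_sum_max_reconfig reconfig_list → Spec_sum_max_reconfig reconfig_list (sum_max_reconfig reconfig_list)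

-- ===== LEMMAS AND PROOFS =====

-- python max of a nonempty run whose head is positive equals folding max from 0
theorem pyMaxRun_pos (x : Int) (xs : List Int) (hx : 0 < x) :
    pyMaxRun (x :: xs) = (x :: xs).foldl max 0 := by
  simp [pyMaxRun, List.foldl_cons, max_eq_right hx.le]

-- loop invariant: A's fold from (mv, cm) plus the maxima already collected in runs
-- equals mv plus the maxima-sum of B's finalized runs, provided cm is the
-- max-from-0 of the current run and the current run's head (if any) is positive.
theorem loop_inv (l : List Int) :
    ∀ (runs : List (List Int)) (cur : List Int) (mv : Int),
      (∀ x ∈ cur.head?, 0 < x) →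
      (let stA := l.foldl
          (fun (st : Int × Int) r =>
            if r > 0 then (st.1, max st.2 r) else (st.1 + st.2, 0))
          (mv, cur.foldl max 0)
       let stB := l.foldl
          (fun (st : List (List Int) × List Int) r =>
            if r > 0 then (st.1, st.2 ++ [r])
            else (if st.2 ≠ [] then st.1 ++ [st.2] else st.1, []))
          (runs, cur)
       stA.1 + stA.2 + (runs.map pyMaxRun).sum =
         mv + (((if stB.2 ≠ [] then stB.1 ++ [stB.2] else stB.1).map pyMaxRun)).sum) := by
  induction l with
  | nil =>
    intro runs cur mv hcur
    cases cur with
    | nil => simp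
    | cons x xs =>
      have hx : 0 < x := hcur x rfl
      simp [pyMaxRun_pos x xs hx, List.foldl_cons]
      ring
  | cons r rest ih =>
    intro runs cur mv hcur
    by_cases hr : r > 0
    · have h1 : (cur ++ [r]).foldl max 0 = max (cur.foldl max 0) r := by
        simp [List.foldl_append]
      have hhead : ∀ x ∈ (cur ++ [r]).head?, 0 < x := by
        cases cur with
        | nil => intro x hx; simp at hx; omega
        | cons y ys => intro x hx; simp at hx; subst hx; exact hcur y rfl
      have := ih runs (cur ++ [r]) mv hhead
      simpa [hr, h1] using this
    · cases cur with
      | nil =>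
        have := ih runs [] mv (by simp)
        simpa [hr] using this
      | cons x xs =>
        have hx : 0 < x := hcur x rfl
        have hmax : pyMaxRun (x :: xs) = (x :: xs).foldl max 0 := pyMaxRun_pos x xs hx
        have := ih (runs ++ [x :: xs]) [] (mv + (x :: xs).foldl max 0) (by simp)
        simp only [hr, if_false, List.foldl_cons, List.map_append, List.sum_append,
          List.map_cons, List.map_nil, List.sum_cons, List.sum_nil, hmax, ne_eq,
          List.cons_ne_nil, not_false_eq_true, if_true, List.foldl_nil] at this ⊢
        omega

-- ===== VERDICT (by name: the statement is the Claim_ definition above) =====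
theorem sum_max_reconfig_spec : Claim_equal_sum_max_reconfig := by
  intro l _
  unfold Spec_sum_max_reconfig sum_max_reconfig sum_max_reconfig_alt
  have := loop_inv l [] [] 0 (by simp)
  simpa using this
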